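-- pv_equiv track=rewrite | github.com/rohan5551/singlepasschunking | src/processors/lmm_processor.py | _parse_chunks
-- ===== SOURCE A (Python) =====
-- from typing import Any, Dict, List, Optional
--
-- def _parse_chunks(text: str) -> List[str]:
--     if not text:
--         return []
--
--     chunks: List[str] = []
--     current: List[str] = []
--
--     for line in text.splitlines():
--         stripped = line.strip()
--         if stripped.startswith("###") or stripped.lower().startswith("chunk"):
--             if current:
--                 chunk_text = "\n".join(current).strip()
--                 if chunk_text:
--                     chunks.append(chunk_text)
--                 current = []
--         current.append(line)
--
--     if current:
--         chunk_text = "\n".join(current).strip()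
--         if chunk_text:
--             chunks.append(chunk_text)
--
--     if not chunks:
--         single_chunk = text.strip()
--         return [single_chunk] if single_chunk else []
--
--     return chunks
-- ===== SOURCE B (Python) =====
-- from typing import List
--
--
-- def _is_header(line: str) -> bool:
--     stripped = line.strip()
--     return stripped.startswith("###") or stripped.lower().startswith("chunk")
--
--
-- def _split_leading(lines: List[str]):
--     """First line plus the following run of non-header lines, and the rest."""
--     seg = [lines[0]]
--     k = 1
--     while k < len(lines) and not _is_header(lines[k]):
--         seg.append(lines[k])
--         k += 1
--     return seg, lines[k:]
--
--
-- def _chunks_of(lines: List[str]) -> List[str]: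
--     if not lines:
--         return []
--     seg, rest = _split_leading(lines)
--     piece = "\n".join(seg).strip()
--     return ([piece] if piece else []) + _chunks_of(rest)
--
--
-- def _parse_chunks(text: str) -> List[str]:
--     if not text:
--         return []
--     chunks = _chunks_of(text.splitlines())
--     if not chunks:
--         single_chunk = text.strip()
--         return [single_chunk] if single_chunk else []
--     return chunks
-- ===== Notes on version B (the rewrite author's own statement) =====
-- stated objective: alternative
-- what changed: Replaces A's single loop with mutable chunks/current accumulators by a recursive decomposition: repeatedly split off the leading segment (first line plus the following run of non-header lines) and recurse on the rest.
import Mathlib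
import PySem

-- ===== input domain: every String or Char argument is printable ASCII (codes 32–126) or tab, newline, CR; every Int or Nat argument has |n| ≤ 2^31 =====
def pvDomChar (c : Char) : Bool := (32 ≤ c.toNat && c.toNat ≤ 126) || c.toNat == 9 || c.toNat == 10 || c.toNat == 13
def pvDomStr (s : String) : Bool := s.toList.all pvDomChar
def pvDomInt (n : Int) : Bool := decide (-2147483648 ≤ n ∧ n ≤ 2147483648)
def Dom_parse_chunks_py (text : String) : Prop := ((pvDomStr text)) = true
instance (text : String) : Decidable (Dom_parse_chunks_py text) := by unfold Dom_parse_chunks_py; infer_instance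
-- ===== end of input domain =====

-- B replaces A's accumulator loop by a recursive leading-segment split (same cost); equivalence of return values is proved below.


-- ===== PORT A =====
-- the body of A's for-loop, state = (chunks, current)
def pvStepA (st : List String × List String) (line : String) : List String × List String :=
  let chunks := st.1
  let current := st.2
  let stripped := PySem.Str.strip line
  if PySem.Str.startswith stripped "###" || PySem.Str.startswith (PySem.Str.lower stripped) "chunk" then
    let p :=
      if current ≠ [] then
        let chunk_text := PySem.Str.strip (PySem.Str.join "\n" current)
        ((if chunk_text ≠ "" then chunks ++ [chunk_text] else chunks), ([] : List String))
      else (chunks, current)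
    (p.1, p.2 ++ [line])
  else (chunks, current ++ [line])

def parse_chunks_py (text : String) : List String :=
  if text = "" then []
  else
    let st := (PySem.Str.splitlines text).foldl pvStepA ([], [])
    let chunks :=
      if st.2 ≠ [] then
        let chunk_text := PySem.Str.strip (PySem.Str.join "\n" st.2)
        if chunk_text ≠ "" then st.1 ++ [chunk_text] else st.1
      else st.1
    if chunks = [] then
      let single_chunk := PySem.Str.strip text
      if single_chunk ≠ "" then [single_chunk] else []
    else chunks

-- ===== PORT B =====
def pvIsHeader (line : String) : Bool :=
  let stripped := PySem.Str.strip line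
  PySem.Str.startswith stripped "###" || PySem.Str.startswith (PySem.Str.lower stripped) "chunk"

-- _split_leading's index loop over lines[1:], ported as the obvious structural recursion over the tail:
-- returns (run of non-header lines, rest)
def pvTakeSeg : List String → List String × List String
  | [] => ([], [])
  | l :: ls => if pvIsHeader l then ([], l :: ls)
               else
                 let p := pvTakeSeg ls
                 (l :: p.1, p.2)

theorem pvTakeSeg_rest_le : ∀ ls : List String, (pvTakeSeg ls).2.length ≤ ls.length := by
  intro ls
  induction ls with
  | nil => simp [pvTakeSeg]
  | cons l ls ih =>
    simp only [pvTakeSeg]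
    split
    · simp
    · simpa using Nat.le_succ_of_le ih

def pvChunksOf : List String → List String
  | [] => []
  | l :: ls =>
    let p := pvTakeSeg ls
    let piece := PySem.Str.strip (PySem.Str.join "\n" (l :: p.1))
    (if piece ≠ "" then [piece] else []) ++ pvChunksOf p.2
termination_by lines => lines.length
decreasing_by
  exact Nat.lt_succ_of_le (pvTakeSeg_rest_le ls)

def parse_chunks_py_alt (text : String) : List String :=
  if text = "" then []
  else
    let chunks := pvChunksOf (PySem.Str.splitlines text)
    if chunks = [] then
      let single_chunk := PySem.Str.strip text
      if single_chunk ≠ "" then [single_chunk] else []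
    else chunks

-- ===== PRECONDITION & SPEC =====
def Spec_parse_chunks_py (text : String) (out : List String) : Prop := out = parse_chunks_py_alt text
instance (text : String) (out : List String) : Decidable (Spec_parse_chunks_py text out) := by unfold Spec_parse_chunks_py; infer_instance

-- ===== CLAIM (what is proved, stated in full; the proofs are below) =====
def Claim_equal_parse_chunks_py : Prop := ∀ (text : String), Dom_parse_chunks_py text → Spec_parse_chunks_py text (parse_chunks_py text)

-- ===== LEMMAS AND PROOFS =====
-- flush a pending segment: the stripped join, kept only if nonempty
def pvFlush (cur : List String) : List String :=
  let t := PySem.Str.strip (PySem.Str.join "\n" cur)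
  if t ≠ "" then [t] else []

-- A's loop, rephrased with an explicit pending segment and no chunks accumulator
def pvGoA : List String → List String → List String
  | cur, [] => pvFlush cur
  | cur, l :: ls => if pvIsHeader l then pvFlush cur ++ pvGoA [l] ls else pvGoA (cur ++ [l]) ls

theorem pvFlush_nil : pvFlush [] = [] := by decide

theorem pvStepA_eq (st : List String × List String) (line : String) :
    pvStepA st line =
      if pvIsHeader line then (st.1 ++ pvFlush st.2, [line]) else (st.1, st.2 ++ [line]) := by
  simp only [pvStepA, pvIsHeader]
  split
  · by_cases h : st.2 = []
    · simp [h, pvFlush_nil]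
    · simp only [h, ne_eq, not_false_eq_true, if_true, pvFlush]
      split <;> simp_all
  · rfl

theorem pvChunksOf_cons (l : String) (ls : List String) :
    pvChunksOf (l :: ls) = pvFlush (l :: (pvTakeSeg ls).1) ++ pvChunksOf (pvTakeSeg ls).2 := by
  rw [pvChunksOf]
  rw [pvFlush]

theorem pvFoldA (lines : List String) : ∀ (chunks cur : List String),
    (lines.foldl pvStepA (chunks, cur)).1 ++ pvFlush (lines.foldl pvStepA (chunks, cur)).2
      = chunks ++ pvGoA cur lines := by
  induction lines with
  | nil => intro chunks cur; simp [pvGoA]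
  | cons l ls ih =>
    intro chunks cur
    simp only [List.foldl_cons, pvStepA_eq, pvGoA]
    by_cases h : pvIsHeader l
    · simp [h, ih]
    · simp [h, ih]

theorem pvGoA_seg (lines : List String) : ∀ cur : List String,
    pvGoA cur lines = pvFlush (cur ++ (pvTakeSeg lines).1) ++ pvChunksOf (pvTakeSeg lines).2 := by
  induction lines with
  | nil => intro cur; simp [pvGoA, pvTakeSeg, pvChunksOf]
  | cons l ls ih =>
    intro cur
    simp only [pvGoA, pvTakeSeg]
    by_cases h : pvIsHeader l
    · simp only [h, if_true, List.append_nil]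
      rw [ih [l], pvChunksOf_cons]
      simp
    · simp only [h, if_false, Bool.false_eq_true]
      rw [ih (cur ++ [l])]
      simp

theorem pvGoA_nil_eq (lines : List String) : pvGoA [] lines = pvChunksOf lines := by
  cases lines with
  | nil => simp [pvGoA, pvChunksOf, pvFlush_nil]
  | cons l ls =>
    simp only [pvGoA]
    by_cases h : pvIsHeader l
    · rw [if_pos h, pvFlush_nil, List.nil_append, pvGoA_seg, pvChunksOf_cons]
      simp
    · rw [if_neg h, pvGoA_seg, List.nil_append, pvChunksOf_cons]
      simp

-- ===== VERDICT (by name: the statement is the Claim_ definition above) =====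
theorem parse_chunks_py_spec : Claim_equal_parse_chunks_py := by
  intro text _
  unfold Spec_parse_chunks_py parse_chunks_py parse_chunks_py_alt
  by_cases ht : text = ""
  · simp [ht]
  · simp only [ht, if_false]
    have hfold := pvFoldA (PySem.Str.splitlines text) [] []
    rw [List.nil_append] at hfold
    have hA :
        (if ((PySem.Str.splitlines text).foldl pvStepA ([], [])).2 ≠ [] then
           let chunk_text := PySem.Str.strip (PySem.Str.join "\n" ((PySem.Str.splitlines text).foldl pvStepA ([], [])).2)
           if chunk_text ≠ "" then ((PySem.Str.splitlines text).foldl pvStepA ([], [])).1 ++ [chunk_text]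
           else ((PySem.Str.splitlines text).foldl pvStepA ([], [])).1
         else ((PySem.Str.splitlines text).foldl pvStepA ([], [])).1)
          = pvChunksOf (PySem.Str.splitlines text) := by
      rw [← pvGoA_nil_eq, ← hfold]
      by_cases h : ((PySem.Str.splitlines text).foldl pvStepA ([], [])).2 = []
      · simp [h, pvFlush_nil]
      · simp only [h, ne_eq, not_false_eq_true, if_true, pvFlush]
        split <;> simp_all
    rw [hA]
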